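-- pv_equiv track=rewrite | github.com/puyuhan1/generate_resume | generate_resume/generate_sections.py | generate_fake_achievements
-- ===== SOURCE A (Python) =====
-- def generate_fake_achievements(major, skills):
--     bullets = []
--     major = major.lower() if major else ""
--     skills = [s.lower() for s in skills]
--
--     # Data Science / Statistics / Analytics
--     if any(kw in major for kw in ["data", "statistics", "analytics"]):
--         if "python" in skills:
--             bullets.append("  - Built data pipelines and analysis tools using Python and Pandas.")
--         if "sql" in skills:
--             bullets.append("  - Designed and executed complex SQL queries to extract actionable insights from databases.")
--         if "machine learning" in skills:
--             bullets.append("  - Developed predictive models to support data-driven decision-making.")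
--         if not bullets:
--             bullets.append("  - Led end-to-end development of analytics projects using modern software tools to derive actionable insights.")
--         return bullets
--
--     # Computer Science / Software Engineering
--     if any(kw in major for kw in ["computer", "software", "cs"]):
--         if "java" in skills:
--             bullets.append("  - Developed and maintained backend services using Java and Spring Boot.")
--         if "cloud" in skills or "aws" in skills:
--             bullets.append("  - Deployed scalable applications on cloud platforms such as AWS.")
--         if "python" in skills:
--             bullets.append("  - Created automation scripts and APIs using Python.")
--         if not bullets:
--             bullets.append("  - Led end-to-end development of technical projects using modern software tools to deliver robust solutions.")
--         return bullets
--
--     # Finance / Business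
--     if any(kw in major for kw in ["finance", "business", "economics"]):
--         if "excel" in skills:
--             bullets.append("  - Built financial models and dashboards in Excel to support strategic decision-making.")
--         if "sql" in skills:
--             bullets.append("  - Queried financial datasets to identify trends and performance metrics.")
--         if not bullets:
--             bullets.append("  - Led business-focused analytics projects using industry-standard tools to improve operations.")
--         return bullets
--
--     # Default fallback
--     bullets.append("  - Led end-to-end development of analytics projects using modern software tools to derive actionable insights.")
--     return bullets
-- ===== SOURCE B (Python) =====
-- # Different decomposition: one pass over skills builds a set; the category is an
-- # integer found by first-match over a flat keyword->category list; the bullets come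
-- # from a single filter over one flat (category, needed-skills, bullet) table, and the
-- # per-category fallbacks and the global default are unified into one indexed table.
--
-- _KEYWORDS = [("data", 1), ("statistics", 1), ("analytics", 1),
--              ("computer", 2), ("software", 2), ("cs", 2),
--              ("finance", 3), ("business", 3), ("economics", 3)]
--
-- _BULLETS = [
--     (1, {"python"}, "  - Built data pipelines and analysis tools using Python and Pandas."),
--     (1, {"sql"}, "  - Designed and executed complex SQL queries to extract actionable insights from databases."),
--     (1, {"machine learning"}, "  - Developed predictive models to support data-driven decision-making."),
--     (2, {"java"}, "  - Developed and maintained backend services using Java and Spring Boot."),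
--     (2, {"cloud", "aws"}, "  - Deployed scalable applications on cloud platforms such as AWS."),
--     (2, {"python"}, "  - Created automation scripts and APIs using Python."),
--     (3, {"excel"}, "  - Built financial models and dashboards in Excel to support strategic decision-making."),
--     (3, {"sql"}, "  - Queried financial datasets to identify trends and performance metrics."),
-- ]
--
-- _FALLBACKS = [
--     "  - Led end-to-end development of analytics projects using modern software tools to derive actionable insights.",  # no category
--     "  - Led end-to-end development of analytics projects using modern software tools to derive actionable insights.",  # data
--     "  - Led end-to-end development of technical projects using modern software tools to deliver robust solutions.",    # cs
--     "  - Led business-focused analytics projects using industry-standard tools to improve operations.",                 # finance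
-- ]
--
-- def generate_fake_achievements(major, skills):
--     m = major.lower() if major else ""
--     have = {s.lower() for s in skills}
--     cat = next((c for kw, c in _KEYWORDS if kw in m), 0)
--     out = [b for c, need, b in _BULLETS if c == cat and not have.isdisjoint(need)]
--     return out or [_FALLBACKS[cat]]
-- ===== Notes on version B (the rewrite author's own statement) =====
-- stated objective: alternative
-- what changed: B makes one pass over skills to build a set, resolves the category as an integer by first-match over a flat keyword->category list, produces the bullets by a single filter over one flat (category, needed-skills, bullet) table, and unifies the per-category fallbacks and the default into one indexed fallback table, replacing A's three hard-coded if-blocks with repeated list scans.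
import Mathlib
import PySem

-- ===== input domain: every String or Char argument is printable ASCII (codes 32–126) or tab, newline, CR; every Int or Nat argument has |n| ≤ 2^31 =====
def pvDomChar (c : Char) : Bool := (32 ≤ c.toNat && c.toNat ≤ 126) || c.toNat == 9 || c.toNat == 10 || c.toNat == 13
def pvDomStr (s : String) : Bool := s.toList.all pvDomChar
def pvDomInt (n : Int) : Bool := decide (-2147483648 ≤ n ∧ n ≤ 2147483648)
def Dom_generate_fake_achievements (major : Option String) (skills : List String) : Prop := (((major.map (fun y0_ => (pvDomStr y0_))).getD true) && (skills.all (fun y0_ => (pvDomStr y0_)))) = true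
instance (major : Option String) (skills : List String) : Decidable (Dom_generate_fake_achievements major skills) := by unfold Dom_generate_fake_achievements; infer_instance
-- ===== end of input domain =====

-- B builds a set of lowercased skills in one pass, resolves the category as an integer by
-- first-match over a flat keyword list, and filters one flat bullet table; objective:
-- alternative (same cost, different decomposition). Same return values everywhere.

-- ===== PORT A =====
def generate_fake_achievements (major : Option String) (skills : List String) : List String :=
  let bullets : List String := []
  let m : String := match major with
    | none => ""
    | some s => if s == "" then "" else PySem.Str.lower s   -- 'major.lower() if major else ""' ("" is falsy)
  let sk : List String := skills.map PySem.Str.lower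
  if ["data", "statistics", "analytics"].any (fun kw => PySem.Str.isIn kw m) then
    let bullets := if sk.contains "python" then bullets ++ ["  - Built data pipelines and analysis tools using Python and Pandas."] else bullets
    let bullets := if sk.contains "sql" then bullets ++ ["  - Designed and executed complex SQL queries to extract actionable insights from databases."] else bullets
    let bullets := if sk.contains "machine learning" then bullets ++ ["  - Developed predictive models to support data-driven decision-making."] else bullets
    let bullets := if bullets.isEmpty then bullets ++ ["  - Led end-to-end development of analytics projects using modern software tools to derive actionable insights."] else bullets
    bullets
  else if ["computer", "software", "cs"].any (fun kw => PySem.Str.isIn kw m) then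
    let bullets := if sk.contains "java" then bullets ++ ["  - Developed and maintained backend services using Java and Spring Boot."] else bullets
    let bullets := if sk.contains "cloud" || sk.contains "aws" then bullets ++ ["  - Deployed scalable applications on cloud platforms such as AWS."] else bullets
    let bullets := if sk.contains "python" then bullets ++ ["  - Created automation scripts and APIs using Python."] else bullets
    let bullets := if bullets.isEmpty then bullets ++ ["  - Led end-to-end development of technical projects using modern software tools to deliver robust solutions."] else bullets
    bullets
  else if ["finance", "business", "economics"].any (fun kw => PySem.Str.isIn kw m) then
    let bullets := if sk.contains "excel" then bullets ++ ["  - Built financial models and dashboards in Excel to support strategic decision-making."] else bullets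
    let bullets := if sk.contains "sql" then bullets ++ ["  - Queried financial datasets to identify trends and performance metrics."] else bullets
    let bullets := if bullets.isEmpty then bullets ++ ["  - Led business-focused analytics projects using industry-standard tools to improve operations."] else bullets
    bullets
  else
    bullets ++ ["  - Led end-to-end development of analytics projects using modern software tools to derive actionable insights."]

-- ===== PORT B =====
-- _KEYWORDS of Source B: flat keyword -> category-number list
def pvKeywords : List (String × Nat) :=
  [("data", 1), ("statistics", 1), ("analytics", 1),
   ("computer", 2), ("software", 2), ("cs", 2),
   ("finance", 3), ("business", 3), ("economics", 3)]

-- _BULLETS of Source B: one flat (category, needed-skill set, bullet) table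
def pvBullets : List (Nat × PySem.Set String × String) :=
  [(1, ["python"], "  - Built data pipelines and analysis tools using Python and Pandas."),
   (1, ["sql"], "  - Designed and executed complex SQL queries to extract actionable insights from databases."),
   (1, ["machine learning"], "  - Developed predictive models to support data-driven decision-making."),
   (2, ["java"], "  - Developed and maintained backend services using Java and Spring Boot."),
   (2, ["cloud", "aws"], "  - Deployed scalable applications on cloud platforms such as AWS."),
   (2, ["python"], "  - Created automation scripts and APIs using Python."),
   (3, ["excel"], "  - Built financial models and dashboards in Excel to support strategic decision-making."),
   (3, ["sql"], "  - Queried financial datasets to identify trends and performance metrics.")]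

-- _FALLBACKS of Source B, indexed by category number (0 = no category matched)
def pvFallbacks : List String :=
  ["  - Led end-to-end development of analytics projects using modern software tools to derive actionable insights.",
   "  - Led end-to-end development of analytics projects using modern software tools to derive actionable insights.",
   "  - Led end-to-end development of technical projects using modern software tools to deliver robust solutions.",
   "  - Led business-focused analytics projects using industry-standard tools to improve operations."]

-- 'next((c for kw, c in _KEYWORDS if kw in m), 0)': first matching keyword's category, else 0
def pvFirstCat (m : String) : List (String × Nat) → Nat
  | [] => 0
  | (kw, c) :: rest => if PySem.Str.isIn kw m then c else pvFirstCat m rest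

def generate_fake_achievements_alt (major : Option String) (skills : List String) : List String :=
  let m : String := match major with
    | none => ""
    | some s => if s == "" then "" else PySem.Str.lower s
  let haveSet : PySem.Set String := PySem.Set.ofList (skills.map PySem.Str.lower)
  let cat : Nat := pvFirstCat m pvKeywords
  let out : List String :=
    (pvBullets.filter (fun e => e.1 == cat && !(PySem.Set.isdisjoint haveSet e.2.1))).map (fun e => e.2.2)
  -- _FALLBACKS[cat]: cat ∈ {0,1,2,3} is always in range, so plain getD is exact here
  if out.isEmpty then [pvFallbacks.getD cat ""] else out

-- ===== PRECONDITION & SPEC =====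
def Spec_generate_fake_achievements (major : Option String) (skills : List String) (out : List String) : Prop := out = generate_fake_achievements_alt major skills
instance (major : Option String) (skills : List String) (out : List String) : Decidable (Spec_generate_fake_achievements major skills out) := by unfold Spec_generate_fake_achievements; infer_instance

-- ===== CLAIM (what is proved, stated in full; the proofs are below) =====
def Claim_equal_generate_fake_achievements : Prop := ∀ (major : Option String) (skills : List String), Dom_generate_fake_achievements major skills → Spec_generate_fake_achievements major skills (generate_fake_achievements major skills)

-- ===== LEMMAS AND PROOFS =====

-- the flat first-match over pvKeywords equals A's three grouped 'any' tests
theorem pvFirstCat_eq (m : String) : pvFirstCat m pvKeywords =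
    (if ["data", "statistics", "analytics"].any (fun kw => PySem.Str.isIn kw m) then 1
     else if ["computer", "software", "cs"].any (fun kw => PySem.Str.isIn kw m) then 2
     else if ["finance", "business", "economics"].any (fun kw => PySem.Str.isIn kw m) then 3
     else 0) := by
  simp only [pvKeywords, pvFirstCat, List.any_cons, List.any_nil, Bool.or_false]
  cases PySem.Str.isIn "data" m <;> cases PySem.Str.isIn "statistics" m <;>
    cases PySem.Str.isIn "analytics" m <;> cases PySem.Str.isIn "computer" m <;>
    cases PySem.Str.isIn "software" m <;> cases PySem.Str.isIn "cs" m <;>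
    cases PySem.Str.isIn "finance" m <;> cases PySem.Str.isIn "business" m <;>
    cases PySem.Str.isIn "economics" m <;> rfl

-- membership in the one-pass set equals a scan of the lowered list (singleton need-set)
theorem notDisj_single (sk : List String) (x : String) :
    (!(PySem.Set.isdisjoint (PySem.Set.ofList sk) [x])) = sk.contains x := by
  rw [Bool.eq_iff_iff]
  simp [PySem.Set.isdisjoint, PySem.Set.contains, PySem.Set.mem_ofList]

-- the two-element need-set {"cloud","aws"} equals A's disjunction of two scans
theorem notDisj_pair (sk : List String) (x y : String) :
    (!(PySem.Set.isdisjoint (PySem.Set.ofList sk) [x, y])) = (sk.contains x || sk.contains y) := by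
  rw [Bool.eq_iff_iff]
  simp [PySem.Set.isdisjoint, PySem.Set.contains, PySem.Set.mem_ofList]
  constructor
  · rintro ⟨z, hz, rfl | rfl⟩
    · exact Or.inl hz
    · exact Or.inr hz
  · rintro (h | h)
    · exact ⟨x, h, Or.inl rfl⟩
    · exact ⟨y, h, Or.inr rfl⟩

-- ===== VERDICT (by name: the statement is the Claim_ definition above) =====
set_option maxHeartbeats 1000000 in
theorem generate_fake_achievements_spec : Claim_equal_generate_fake_achievements := by
  intro major skills _
  unfold Spec_generate_fake_achievements generate_fake_achievements generate_fake_achievements_alt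
  simp only [pvFirstCat_eq, pvBullets, List.filter_cons, List.filter_nil, notDisj_single,
    notDisj_pair, pvFallbacks]
  generalize (List.map PySem.Str.lower skills) = sk
  generalize (match major with
    | none => ""
    | some s => if (s == "") = true then "" else PySem.Str.lower s) = m
  cases h1 : (["data", "statistics", "analytics"].any fun kw => PySem.Str.isIn kw m) <;>
    cases h2 : (["computer", "software", "cs"].any fun kw => PySem.Str.isIn kw m) <;>
    cases h3 : (["finance", "business", "economics"].any fun kw => PySem.Str.isIn kw m) <;>
    simp only [Bool.false_eq_true, if_true, if_false]
  · rfl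
  · cases sk.contains "excel" <;> cases sk.contains "sql" <;> rfl
  · cases sk.contains "java" <;> cases sk.contains "cloud" <;> cases sk.contains "aws" <;>
      cases sk.contains "python" <;> rfl
  · cases sk.contains "java" <;> cases sk.contains "cloud" <;> cases sk.contains "aws" <;>
      cases sk.contains "python" <;> rfl
  · cases sk.contains "python" <;> cases sk.contains "sql" <;>
      cases sk.contains "machine learning" <;> rfl
  · cases sk.contains "python" <;> cases sk.contains "sql" <;>
      cases sk.contains "machine learning" <;> rfl
  · cases sk.contains "python" <;> cases sk.contains "sql" <;>
      cases sk.contains "machine learning" <;> rfl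
  · cases sk.contains "python" <;> cases sk.contains "sql" <;>
      cases sk.contains "machine learning" <;> rfl
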